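-- pv_equiv track=rewrite | github.com/rhz0205/GEN_EVAL | src/modules/video_integrity.py | resolution_consistency_pass
-- ===== SOURCE A (Python) =====
-- from typing import Any
--
-- def resolution_consistency_pass(sizes: list[tuple[Any, Any]], expected_count: int) -> bool:
--     valid_sizes = []
--     for width, height in sizes:
--         try:
--             w = int(width)
--             h = int(height)
--         except (TypeError, ValueError):
--             continue
--         if w > 0 and h > 0:
--             valid_sizes.append((w, h))
--
--     if len(valid_sizes) != expected_count:
--         return False
--     return len(set(valid_sizes)) == 1
-- ===== SOURCE B (Python) =====
-- def _valid(width, height):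
--     try:
--         w = int(width)
--         h = int(height)
--     except (TypeError, ValueError):
--         return None
--     return (w, h) if w > 0 and h > 0 else None
--
-- def resolution_consistency_pass(sizes, expected_count):
--     it = iter(sizes)
--     # phase 1: locate the candidate uniform size = first valid size
--     candidate = None
--     for width, height in it:
--         candidate = _valid(width, height)
--         if candidate is not None:
--             break
--     if candidate is None:
--         return False
--     # phase 2: verify the rest against the candidate, early exit on mismatch
--     k = 1
--     for width, height in it:
--         v = _valid(width, height)
--         if v is None:
--             continue
--         if v != candidate:
--             return False
--         k += 1
--     return k == expected_count
-- ===== Notes on version B (the rewrite author's own statement) =====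
-- stated objective: alternative
-- what changed: Two-phase scan over a shared iterator: first locate the candidate uniform size (the first valid pair) and stop, then verify the remaining pairs against it with an early return False on the first mismatch while counting matches; no list of valid sizes and no set are ever materialized.
import Mathlib
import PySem

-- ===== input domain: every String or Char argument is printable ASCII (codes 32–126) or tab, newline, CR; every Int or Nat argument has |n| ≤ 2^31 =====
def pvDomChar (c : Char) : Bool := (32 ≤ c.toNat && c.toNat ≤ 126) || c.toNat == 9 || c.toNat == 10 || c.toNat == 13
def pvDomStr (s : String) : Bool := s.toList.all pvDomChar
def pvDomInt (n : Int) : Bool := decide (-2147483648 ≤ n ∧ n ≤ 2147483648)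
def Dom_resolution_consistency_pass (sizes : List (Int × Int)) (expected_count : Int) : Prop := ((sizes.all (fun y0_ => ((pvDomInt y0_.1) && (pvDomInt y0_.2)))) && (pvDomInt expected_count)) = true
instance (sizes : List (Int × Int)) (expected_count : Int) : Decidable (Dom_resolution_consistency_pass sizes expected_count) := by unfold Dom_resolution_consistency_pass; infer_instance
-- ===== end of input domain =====

-- B replaces A's "collect all valid sizes, compare length, take a set" by a two-phase scan:
-- find the first valid size as the candidate, then verify the rest against it with an early
-- exit on mismatch while counting matches (objective: alternative; O(1) extra space).
-- On (Int × Int) inputs the int() parse never raises, so both functions are total.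

-- ===== PORT A =====
def resolution_consistency_pass (sizes : List (Int × Int)) (expected_count : Int) : Bool :=
  let valid_sizes :=
    sizes.foldl (fun acc p => if p.1 > 0 && p.2 > 0 then acc ++ [p] else acc) ([] : List (Int × Int))
  if (valid_sizes.length : Int) ≠ expected_count then false
  else decide ((PySem.Set.ofList valid_sizes).length = 1)

-- ===== PORT B =====
-- phase 1 of Source B: scan the iterator for the first valid pair; returns it and the unconsumed rest
def pvFindFirst : List (Int × Int) → Option ((Int × Int) × List (Int × Int))
  | [] => none
  | p :: rest => if p.1 > 0 && p.2 > 0 then some (p, rest) else pvFindFirst rest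

-- phase 2 of Source B: verify remaining pairs against the candidate f, early false on mismatch,
-- counting matches in k; at the end compare the count with expected_count
def pvVerify (f : Int × Int) (l : List (Int × Int)) (k : Int) (ec : Int) : Bool :=
  match l with
  | [] => decide (k = ec)
  | p :: rest =>
      if p.1 > 0 && p.2 > 0 then
        if p ≠ f then false else pvVerify f rest (k + 1) ec
      else pvVerify f rest k ec

def resolution_consistency_pass_alt (sizes : List (Int × Int)) (expected_count : Int) : Bool :=
  match pvFindFirst sizes with
  | none => false
  | some (f, rest) => pvVerify f rest 1 expected_count

-- ===== PRECONDITION & SPEC =====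
def Spec_resolution_consistency_pass (sizes : List (Int × Int)) (expected_count : Int) (out : Bool) : Prop := out = resolution_consistency_pass_alt sizes expected_count
instance (sizes : List (Int × Int)) (expected_count : Int) (out : Bool) : Decidable (Spec_resolution_consistency_pass sizes expected_count out) := by unfold Spec_resolution_consistency_pass; infer_instance

-- ===== CLAIM (what is proved, stated in full; the proofs are below) =====
def Claim_equal_resolution_consistency_pass : Prop := ∀ (sizes : List (Int × Int)) (expected_count : Int), Dom_resolution_consistency_pass sizes expected_count → Spec_resolution_consistency_pass sizes expected_count (resolution_consistency_pass sizes expected_count)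

-- ===== LEMMAS AND PROOFS =====

-- pvFindFirst characterized by the filtered list
lemma findFirst_nil (l : List (Int × Int)) (h : pvFindFirst l = none) :
    l.filter (fun p => p.1 > 0 && p.2 > 0) = [] := by
  induction l with
  | nil => rfl
  | cons p rest ih =>
    by_cases hp : (decide (p.1 > 0) && decide (p.2 > 0)) = true
    · simp [pvFindFirst, hp] at h
    · simp only [pvFindFirst, hp] at h
      simp [List.filter_cons, hp, ih h]

lemma findFirst_some (l : List (Int × Int)) (f : Int × Int) (rest : List (Int × Int))
    (h : pvFindFirst l = some (f, rest)) :
    l.filter (fun p => p.1 > 0 && p.2 > 0) = f :: rest.filter (fun p => p.1 > 0 && p.2 > 0) := by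
  induction l generalizing rest with
  | nil => simp [pvFindFirst] at h
  | cons p tl ih =>
    by_cases hp : (decide (p.1 > 0) && decide (p.2 > 0)) = true
    · simp only [pvFindFirst, hp, if_true, Option.some.injEq, Prod.mk.injEq] at h
      obtain ⟨rfl, rfl⟩ := h
      simp [List.filter_cons, hp]
    · simp only [pvFindFirst, hp] at h
      simp [List.filter_cons, hp, ih rest h]

-- pvVerify characterized by the filtered list
lemma verify_filter (f : Int × Int) (l : List (Int × Int)) (k ec : Int) :
    pvVerify f l k ec =
      (if (l.filter (fun p => p.1 > 0 && p.2 > 0)).all (fun p => p == f)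
       then decide (k + (l.filter (fun p => p.1 > 0 && p.2 > 0)).length = ec) else false) := by
  induction l generalizing k with
  | nil => simp [pvVerify]
  | cons p tl ih =>
    by_cases hp : (decide (p.1 > 0) && decide (p.2 > 0)) = true
    · by_cases hf : p = f
      · subst hf
        simp only [pvVerify, hp, if_true, ne_eq, not_true_eq_false, if_false, ih,
          List.filter_cons, List.all_cons, BEq.rfl, Bool.true_and, List.length_cons]
        split
        · simp only [decide_eq_decide]
          push_cast
          omega
        · rfl
      · simp [pvVerify, hp, hf, List.filter_cons, beq_iff_eq]
    · simp [pvVerify, hp, List.filter_cons, ih]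

-- A's set construction: the dedup of f :: t has length 1 iff every element of t equals f
lemma len_le_foldl_add (l : List (Int × Int)) (s : List (Int × Int)) :
    s.length ≤ (l.foldl PySem.Set.add s).length := by
  induction l generalizing s with
  | nil => simp
  | cons p l ih =>
    refine le_trans ?_ (ih (PySem.Set.add s p))
    simp only [PySem.Set.add]
    split <;> simp

lemma setlen_one (l : List (Int × Int)) (f : Int × Int) :
    decide ((l.foldl PySem.Set.add [f]).length = 1) = l.all (fun p => p == f) := by
  induction l with
  | nil => simp
  | cons p l ih =>
    by_cases hp : p = f
    · simp [PySem.Set.add, PySem.Set.contains, hp, ih]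
    · have h2 := len_le_foldl_add l [f, p]
      have hadd : PySem.Set.add [f] p = [f, p] := by
        simp [PySem.Set.add, PySem.Set.contains]
        exact hp
      simp only [List.foldl_cons, hadd, List.all_cons]
      have : ¬ (l.foldl PySem.Set.add [f, p]).length = 1 := by
        simp at h2; omega
      simp [this, hp]

-- ===== VERDICT (by name: the statement is the Claim_ definition above) =====
theorem resolution_consistency_pass_spec : Claim_equal_resolution_consistency_pass := by
  intro sizes ec _
  unfold Spec_resolution_consistency_pass resolution_consistency_pass resolution_consistency_pass_alt
  rw [PySem.List.foldl_append_if_eq_filter]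
  simp only [List.nil_append]
  cases hf : pvFindFirst sizes with
  | none => simp [findFirst_nil sizes hf]
  | some fr =>
    obtain ⟨f, rest⟩ := fr
    rw [findFirst_some sizes f rest hf]
    change _ = pvVerify f rest 1 ec
    rw [verify_filter]
    have h0 : PySem.Set.ofList (f :: rest.filter (fun p => p.1 > 0 && p.2 > 0)) =
        List.foldl PySem.Set.add [f] (rest.filter (fun p => p.1 > 0 && p.2 > 0)) := rfl
    set t := rest.filter (fun p => p.1 > 0 && p.2 > 0) with ht
    simp only [h0, setlen_one]
    by_cases ha : (t.all (fun p => p == f)) = true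
    · simp only [ha, if_true, List.length_cons]
      by_cases hec : ((1 : Int) + t.length = ec)
      · have h1 : ¬ (((t.length + 1 : Nat) : Int) ≠ ec) := by push_cast; omega
        rw [if_neg h1]
        exact (decide_eq_true (by omega)).symm
      · have h1 : (((t.length + 1 : Nat) : Int) ≠ ec) := by push_cast; omega
        rw [if_pos h1]
        exact (decide_eq_false (by omega)).symm
    · simp [ha]
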